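-- pv_equiv track=rewrite | github.com/SomethinggMax/BibSTEAKpy | utils/file_generator.py | generate_field
-- ===== SOURCE A (Python) =====
-- MAXIMUM_FIELD_LENGTH = 100
--
-- def generate_field(field_type: str, align_fields_position: int, data: str, add_newlines: bool) -> str:
--     """
--     Generates a str of a field based on parameters.
--     """
--     field_start = "  " + field_type
--     position_minus_length = align_fields_position - len(field_start)
--     padding_size = position_minus_length if position_minus_length > 0 else 0
--     field = field_start + " " * padding_size + "= " + data + ",\n"
--     if add_newlines:
--         counter = 0
--         last_word = ""
--         new_field = ""
--         for char in field:
--             if char == " ":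
--                 if counter >= MAXIMUM_FIELD_LENGTH:
--                     padding = " " * (align_fields_position + 1)
--                     new_field += "\n" + padding + last_word
--                     counter = len(padding + last_word)
--                 else:
--                     new_field += last_word
--                 last_word = ""
--             last_word += char
--             counter += 1
--         field = new_field + last_word
--     return field
-- ===== SOURCE B (Python) =====
-- MAXIMUM_FIELD_LENGTH = 100
--
-- def generate_field(field_type: str, align_fields_position: int, data: str, add_newlines: bool) -> str:
--     """
--     Generates a str of a field based on parameters.
--     """
--     field_start = "  " + field_type
--     position_minus_length = align_fields_position - len(field_start)
--     padding_size = position_minus_length if position_minus_length > 0 else 0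
--     field = field_start + " " * padding_size + "= " + data + ",\n"
--     if not add_newlines:
--         return field
--     # Tokenize once: the run before the first space, then one token per space
--     # (a space plus its following non-space chars).
--     tokens = []
--     current = ""
--     for char in field:
--         if char == " ":
--             tokens.append(current)
--             current = char
--         else:
--             current += char
--     tokens.append(current)
--     # Greedy wrap per token; the final token is never wrapped.
--     padding = " " * (align_fields_position + 1)
--     pieces = []
--     counter = 0
--     for token in tokens[:-1]:
--         counter += len(token)
--         if counter >= MAXIMUM_FIELD_LENGTH:
--             pieces.append("\n" + padding + token)
--             counter = len(padding) + len(token)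
--         else:
--             pieces.append(token)
--     pieces.append(tokens[-1])
--     return "".join(pieces)
-- ===== Notes on version B (the rewrite author's own statement) =====
-- stated objective: alternative
-- what changed: A's single char-by-char loop carrying counter/last_word/new_field state is replaced by a two-phase pass: tokenize the field once at spaces (each token is a space plus its following non-space run), then a greedy per-token wrap loop that never wraps the final token.
import Mathlib
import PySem

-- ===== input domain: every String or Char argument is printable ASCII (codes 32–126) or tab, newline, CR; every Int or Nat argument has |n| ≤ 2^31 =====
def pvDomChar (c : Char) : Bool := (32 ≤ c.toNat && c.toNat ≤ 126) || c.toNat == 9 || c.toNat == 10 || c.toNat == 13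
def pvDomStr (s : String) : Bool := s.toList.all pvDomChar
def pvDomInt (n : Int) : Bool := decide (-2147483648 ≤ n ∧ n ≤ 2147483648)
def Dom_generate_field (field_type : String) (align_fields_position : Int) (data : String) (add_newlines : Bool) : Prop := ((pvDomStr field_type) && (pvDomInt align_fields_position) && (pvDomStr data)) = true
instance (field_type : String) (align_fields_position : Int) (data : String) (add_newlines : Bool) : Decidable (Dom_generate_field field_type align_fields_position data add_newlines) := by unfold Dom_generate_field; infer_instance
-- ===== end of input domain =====

-- B replaces A's char-by-char loop with leftover-word state by a two-phase pass
-- (tokenize at spaces, then a greedy per-token wrap loop); same cost, plainer decomposition.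

-- ===== PORT A =====
-- A's char loop: state (counter, last_word, new_field); a space flushes last_word (wrapping
-- if counter ≥ 100) and starts the next word with the space itself.
def aStep (pad : List Char) (s : Nat × List Char × List Char) (ch : Char) : Nat × List Char × List Char :=
  match s with
  | (counter, last_word, new_field) =>
    if ch = ' ' then
      if counter ≥ 100 then
        (((pad ++ last_word).length) + 1, [ch], new_field ++ '\n' :: (pad ++ last_word))
      else
        (counter + 1, [ch], new_field ++ last_word)
    else
      (counter + 1, last_word ++ [ch], new_field)

def generate_field (field_type : String) (align_fields_position : Int) (data : String) (add_newlines : Bool) : String :=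
  let field_start : List Char := ' ' :: ' ' :: field_type.toList
  let position_minus_length : Int := align_fields_position - (field_start.length : Int)
  let padding_size : Nat := if position_minus_length > 0 then position_minus_length.toNat else 0
  let field : List Char := field_start ++ List.replicate padding_size ' ' ++ ('=' :: ' ' :: data.toList) ++ [',', '\n']
  if add_newlines then
    let pad : List Char := List.replicate (align_fields_position + 1).toNat ' '
    let r := field.foldl (aStep pad) (0, [], [])
    String.mk (r.2.2 ++ r.2.1)
  else
    String.mk field

-- ===== PORT B =====
-- B phase 1: split into the run before the first space, then one token per space
-- (the space plus its following non-space chars).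
def bTokens (acc : List Char) : List Char → List (List Char)
  | [] => [acc]
  | ch :: cs => if ch = ' ' then acc :: bTokens [ch] cs else bTokens (acc ++ [ch]) cs

-- B phase 2: greedy wrap per token; the final token is appended raw.
def bLoop (pad : List Char) (counter : Nat) (out : List Char) : List (List Char) → List Char
  | [] => out
  | [t] => out ++ t
  | t :: u :: rest =>
    let counter' := counter + t.length
    if counter' ≥ 100 then
      bLoop pad (pad.length + t.length) (out ++ '\n' :: (pad ++ t)) (u :: rest)
    else
      bLoop pad counter' (out ++ t) (u :: rest)

def generate_field_alt (field_type : String) (align_fields_position : Int) (data : String) (add_newlines : Bool) : String :=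
  let field_start : List Char := ' ' :: ' ' :: field_type.toList
  let position_minus_length : Int := align_fields_position - (field_start.length : Int)
  let padding_size : Nat := if position_minus_length > 0 then position_minus_length.toNat else 0
  let field : List Char := field_start ++ List.replicate padding_size ' ' ++ ('=' :: ' ' :: data.toList) ++ [',', '\n']
  if add_newlines then
    let pad : List Char := List.replicate (align_fields_position + 1).toNat ' '
    String.mk (bLoop pad 0 [] (bTokens [] field))
  else
    String.mk field

-- ===== PRECONDITION & SPEC =====
def Spec_generate_field (field_type : String) (align_fields_position : Int) (data : String) (add_newlines : Bool) (out : String) : Prop := out = generate_field_alt field_type align_fields_position data add_newlines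
instance (field_type : String) (align_fields_position : Int) (data : String) (add_newlines : Bool) (out : String) : Decidable (Spec_generate_field field_type align_fields_position data add_newlines out) := by unfold Spec_generate_field; infer_instance

-- ===== CLAIM (what is proved, stated in full; the proofs are below) =====
def Claim_equal_generate_field : Prop := ∀ (field_type : String) (align_fields_position : Int) (data : String) (add_newlines : Bool), Dom_generate_field field_type align_fields_position data add_newlines → Spec_generate_field field_type align_fields_position data add_newlines (generate_field field_type align_fields_position data add_newlines)

-- ===== LEMMAS AND PROOFS =====

theorem bTokens_ne_nil (acc : List Char) (cs : List Char) : bTokens acc cs ≠ [] := by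
  induction cs generalizing acc with
  | nil => simp [bTokens]
  | cons ch cs ih =>
    simp only [bTokens]
    split
    · simp
    · exact ih _

-- invariant: A's char fold started with counter = b + prev.length, pending word prev and
-- emitted output out computes B's token loop on (prev :: remaining tokens) with base b.
theorem main_lemma (pad : List Char) (cs : List Char) :
    ∀ (b : Nat) (prev out : List Char),
      (let r := cs.foldl (aStep pad) (b + prev.length, prev, out); r.2.2 ++ r.2.1)
        = bLoop pad b out (bTokens prev cs) := by
  induction cs with
  | nil => intro b prev out; simp [bTokens, bLoop]
  | cons ch cs ih =>
    intro b prev out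
    by_cases hch : ch = ' '
    · subst hch
      obtain ⟨t, ts, hts⟩ : ∃ t ts, bTokens [' '] cs = t :: ts := by
        cases h : bTokens [' '] cs with
        | nil => exact absurd h (bTokens_ne_nil _ _)
        | cons t ts => exact ⟨t, ts, rfl⟩
      by_cases hc : b + prev.length ≥ 100
      · have h := ih (pad.length + prev.length) [' '] (out ++ '\n' :: (pad ++ prev))
        simpa [aStep, bTokens, hts, bLoop, hc, List.length_append, Nat.add_assoc] using h
      · have h := ih (b + prev.length) [' '] (out ++ prev)
        simpa [aStep, bTokens, hts, bLoop, hc, Nat.add_assoc] using h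
    · have h := ih b (prev ++ [ch]) out
      simpa [aStep, bTokens, hch, List.length_append, Nat.add_assoc] using h

-- ===== VERDICT (by name: the statement is the Claim_ definition above) =====
theorem generate_field_spec : Claim_equal_generate_field := by
  intro field_type align_fields_position data add_newlines _
  unfold Spec_generate_field generate_field generate_field_alt
  cases add_newlines with
  | false => simp
  | true =>
    have this := main_lemma
      (List.replicate (align_fields_position + 1).toNat ' ')
      ((' ' :: ' ' :: field_type.toList) ++
        List.replicate (if align_fields_position - ((' ' :: ' ' :: field_type.toList).length : Int) > 0
          then (align_fields_position - ((' ' :: ' ' :: field_type.toList).length : Int)).toNat else 0) ' '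
        ++ ('=' :: ' ' :: data.toList) ++ [',', '\n'])
      0 [] []
    simp only [List.length_nil, Nat.add_zero] at this
    have h2 := congrArg String.mk this
    simpa using h2
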